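-- pv_equiv track=rewrite | github.com/kyj519/CombineFactory | python/draw_prefit_postfit.py | _build_rebin_groups
-- ===== SOURCE A (Python) =====
-- def _build_rebin_groups(nbins: int, rebin_factor: int) -> list[tuple[int, int]]:
--     if rebin_factor <= 1:
--         return [(i, i + 1) for i in range(nbins)]
--     if rebin_factor > nbins:
--         raise ValueError(f"rebin_factor={rebin_factor} > nbins={nbins}")
--
--     groups: list[tuple[int, int]] = []
--     leftover = nbins % rebin_factor
--     start = 0
--     if leftover > 0:
--         groups.append((0, leftover))
--         start = leftover
--     while start < nbins:
--         stop = min(start + rebin_factor, nbins)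
--         groups.append((start, stop))
--         start = stop
--     return groups
-- ===== SOURCE B (Python) =====
-- def _build_rebin_groups(nbins: int, rebin_factor: int) -> list[tuple[int, int]]:
--     if rebin_factor > 1 and rebin_factor > nbins:
--         raise ValueError(f"rebin_factor={rebin_factor} > nbins={nbins}")
--     step = max(rebin_factor, 1)
--     leftover = nbins % step
--     boundaries = ([0] if leftover > 0 else []) + list(range(leftover, nbins + 1, step))
--     return list(zip(boundaries, boundaries[1:]))
-- ===== Notes on version B (the rewrite author's own statement) =====
-- stated objective: alternative
-- what changed: Replaces the stateful while-loop with a running start accumulator by computing the full boundary list (leftover prefix plus an arithmetic range) once and zipping it with its own tail to form adjacent pairs.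
import Mathlib
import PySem

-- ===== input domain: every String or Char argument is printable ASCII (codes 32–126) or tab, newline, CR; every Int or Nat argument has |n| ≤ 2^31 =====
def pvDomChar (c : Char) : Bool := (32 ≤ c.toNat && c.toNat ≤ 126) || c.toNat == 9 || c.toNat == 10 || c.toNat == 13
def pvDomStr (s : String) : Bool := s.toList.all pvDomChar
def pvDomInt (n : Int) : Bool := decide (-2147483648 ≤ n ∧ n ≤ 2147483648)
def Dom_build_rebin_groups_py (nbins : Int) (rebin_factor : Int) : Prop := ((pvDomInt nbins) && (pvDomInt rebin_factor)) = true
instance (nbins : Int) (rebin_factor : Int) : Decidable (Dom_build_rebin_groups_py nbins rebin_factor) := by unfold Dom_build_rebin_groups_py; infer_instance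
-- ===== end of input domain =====

-- B builds the boundary list once (leftover prefix + arithmetic range) and zips it with its tail, instead of A's stateful while loop (alternative decomposition, same cost).

-- ===== PORT A =====
-- the `while start < nbins` loop of A; carries the proof 1 < rebin_factor (available at its call site) for termination
def aLoop (nbins rebin_factor : Int) (hr : 1 < rebin_factor) (start : Int) (acc : List (Int × Int)) : List (Int × Int) :=
  if _h : start < nbins then
    aLoop nbins rebin_factor hr (min (start + rebin_factor) nbins)
      (acc ++ [(start, min (start + rebin_factor) nbins)])
  else acc
termination_by (nbins - start).toNat
decreasing_by omega

def build_rebin_groups_py (nbins : Int) (rebin_factor : Int) : List (Int × Int) :=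
  if hle : rebin_factor ≤ 1 then
    (PySem.List.pyRange 0 nbins 1).map (fun i => (i, i + 1))
  else if nbins < rebin_factor then
    []  -- Python raises ValueError here; excluded by Pre_
  else
    let leftover := PySem.Int.mod nbins rebin_factor
    if 0 < leftover then
      aLoop nbins rebin_factor (by omega) leftover [(0, leftover)]
    else
      aLoop nbins rebin_factor (by omega) 0 []

-- ===== PORT B =====
def build_rebin_groups_py_alt (nbins : Int) (rebin_factor : Int) : List (Int × Int) :=
  if 1 < rebin_factor ∧ nbins < rebin_factor then
    []  -- Python raises ValueError here; excluded by Pre_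
  else
    let step := max rebin_factor 1
    let leftover := PySem.Int.mod nbins step
    let boundaries := (if 0 < leftover then [(0 : Int)] else []) ++ PySem.List.pyRange leftover (nbins + 1) step
    List.zip boundaries (PySem.List.slice boundaries (some 1) none)

-- ===== PRECONDITION & SPEC =====
-- Pre_ excludes exactly the inputs on which A raises ValueError (rebin_factor > 1 and rebin_factor > nbins); B raises there too.
def Pre_build_rebin_groups_py (nbins : Int) (rebin_factor : Int) : Prop :=
  rebin_factor ≤ 1 ∨ rebin_factor ≤ nbins
instance (nbins : Int) (rebin_factor : Int) : Decidable (Pre_build_rebin_groups_py nbins rebin_factor) := by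
  unfold Pre_build_rebin_groups_py; infer_instance
def pvWitness_build_rebin_groups_py : Int × Int := (10, 3)

def Spec_build_rebin_groups_py (nbins : Int) (rebin_factor : Int) (out : List (Int × Int)) : Prop := out = build_rebin_groups_py_alt nbins rebin_factor
instance (nbins : Int) (rebin_factor : Int) (out : List (Int × Int)) : Decidable (Spec_build_rebin_groups_py nbins rebin_factor out) := by unfold Spec_build_rebin_groups_py; infer_instance

-- ===== CLAIM (what is proved, stated in full; the proofs are below) =====
def Claim_equal_build_rebin_groups_py : Prop := ∀ (nbins : Int) (rebin_factor : Int), Dom_build_rebin_groups_py nbins rebin_factor → Pre_build_rebin_groups_py nbins rebin_factor → Spec_build_rebin_groups_py nbins rebin_factor (build_rebin_groups_py nbins rebin_factor)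

-- ===== LEMMAS AND PROOFS =====

-- zipping a mapped range with its own tail yields the adjacent pairs
lemma zipShift (f : Nat → Int) (m : Nat) :
    List.zip ((List.range (m + 1)).map f) (((List.range (m + 1)).map f).drop 1)
      = (List.range m).map (fun k => (f k, f (k + 1))) := by
  apply List.ext_getElem
  · simp
  · intro i h1 h2
    simp


-- A's loop, characterised: starting at leftover + rf*j with nbins = leftover + rf*m, it appends the remaining adjacent pairs
lemma aLoop_eq (rf leftover : Int) (hr : 1 < rf) (m : Nat) :
    ∀ d j : Nat, j + d = m → ∀ acc,
      aLoop (leftover + rf * m) rf hr (leftover + rf * j) acc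
        = acc ++ (List.range d).map (fun k : Nat => (leftover + rf * ((j : Int) + k), leftover + rf * ((j : Int) + k + 1))) := by
  intro d
  induction d with
  | zero =>
    intro j hj acc
    rw [aLoop]
    have hj' : (j : Int) = (m : Int) := by exact_mod_cast congrArg Nat.cast hj
    have : ¬ (leftover + rf * j < leftover + rf * m) := by rw [hj']; omega
    simp [this]
  | succ n ih =>
    intro j hj acc
    have hjm : (j : Int) < (m : Int) := by exact_mod_cast (by omega : j < m)
    have hj1 : ((j : Int) + 1) ≤ (m : Int) := by exact_mod_cast (by omega : j + 1 ≤ m)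
    have h1 : rf * j < rf * m := by
      exact mul_lt_mul_of_pos_left hjm (by omega)
    have h2 : rf * ((j : Int) + 1) ≤ rf * m := by
      exact mul_le_mul_of_nonneg_left hj1 (by omega)
    rw [aLoop]
    have hlt : leftover + rf * j < leftover + rf * m := by omega
    have h3 : rf * ((j : Int) + 1) = rf * (j : Int) + rf := by ring
    have hmin : min (leftover + rf * j + rf) (leftover + rf * m) = leftover + rf * ((j : Nat) + 1 : Nat) := by
      push_cast
      rw [min_eq_left (by linarith)]
      ring
    simp only [hlt, dif_pos, hmin]
    rw [ih (j + 1) (by omega), List.append_assoc]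
    congr 1
    rw [List.range_succ_eq_map, List.map_cons, List.map_map, List.singleton_append]
    congr 1
    all_goals first
      | (apply List.map_congr_left; intro k hk;
         simp only [Function.comp, Prod.mk.injEq]; constructor <;> (push_cast; ring))
      | (simp only [Prod.mk.injEq]; constructor <;> (push_cast; ring))
      | (push_cast; ring)

-- ===== VERDICT (by name: the statement is the Claim_ definition above) =====
theorem build_rebin_groups_py_spec : Claim_equal_build_rebin_groups_py := by
  intro nbins rf _hdom hpre
  unfold Pre_build_rebin_groups_py at hpre
  unfold Spec_build_rebin_groups_py
  by_cases hle : rf ≤ 1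
  · -- step-1 branch
    have hmax : max rf 1 = 1 := max_eq_right hle
    have hmod : PySem.Int.mod nbins 1 = 0 := by
      rw [PySem.Int.mod_eq_emod_of_pos (by omega)]; exact Int.emod_one nbins
    simp only [build_rebin_groups_py, build_rebin_groups_py_alt, hle, dif_pos,
      hmax, hmod, if_neg (by omega : ¬ (1 < rf ∧ nbins < rf)), lt_irrefl,
      if_neg (lt_irrefl 0), if_false, List.nil_append,
      PySem.List.slice_from_one, ← List.drop_one]
    by_cases hn : 0 ≤ nbins
    · rw [PySem.List.pyRange_one, PySem.List.pyRange_one,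
        (by omega : (nbins + 1 - 0).toNat = (nbins - 0).toNat + 1), zipShift]
      simp only [List.map_map]
      apply List.map_congr_left
      intro k hk
      simp only [Function.comp, Prod.mk.injEq]
      try constructor
      all_goals (push_cast; try ring)
    · rw [PySem.List.pyRange_one_eq_nil (by omega), PySem.List.pyRange_one_eq_nil (by omega)]
      simp
  · by_cases hnb : nbins < rf
    · omega
    · have hr : 1 < rf := by omega
      have hmax : max rf 1 = rf := max_eq_left (by omega)
      have hfd : PySem.Int.mod nbins rf = nbins % rf := PySem.Int.mod_eq_emod_of_pos (by omega)
      set leftover := PySem.Int.mod nbins rf with hlo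
      have h0 : 0 ≤ leftover := by rw [hfd]; exact Int.emod_nonneg _ (by omega)
      have hlt : leftover < rf := by rw [hfd]; exact Int.emod_lt_of_pos _ (by omega)
      have hdm : rf * (nbins / rf) + leftover = nbins := by rw [hfd]; exact Int.ediv_add_emod nbins rf
      have hq1 : 1 ≤ nbins / rf := by
        rw [Int.le_ediv_iff_mul_le (by omega)]; omega
      set m : Nat := (nbins / rf).toNat with hmdef
      have hmc : ((m : Int)) = nbins / rf := Int.toNat_of_nonneg (by omega)
      have hm : nbins = leftover + rf * (m : Int) := by rw [hmc]; linarith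
      have hm1 : 1 ≤ m := by omega
      -- boundaries as a mapped range
      have hbr : PySem.List.pyRange leftover (nbins + 1) rf
          = (List.range (m + 1)).map (fun k : Nat => leftover + rf * (k : Int)) := by
        rw [PySem.List.pyRange_of_pos _ _ (by omega)]
        congr 1
        have hcond : leftover < nbins + 1 := by
          have : rf * 1 ≤ rf * (m:Int) := mul_le_mul_of_nonneg_left (by exact_mod_cast hm1) (by omega)
          omega
        rw [if_pos hcond]
        have : nbins + 1 - leftover + rf - 1 = rf * ((m : Int) + 1) := by rw [hm]; ring
        rw [this, Int.mul_ediv_cancel_left _ (by omega : rf ≠ 0)]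
        congr 1
        all_goals omega
      have hA := fun acc => aLoop_eq rf leftover hr m m 0 (by omega) acc
      simp only [Nat.cast_zero, mul_zero, add_zero, zero_add] at hA
      simp only [build_rebin_groups_py, build_rebin_groups_py_alt, dif_neg hle,
        if_neg hnb, if_neg (by omega : ¬ (1 < rf ∧ nbins < rf)), hmax, ← hlo, hbr,
        PySem.List.slice_from_one, ← List.drop_one]
      by_cases hpos : 0 < leftover
      · simp only [if_pos hpos]
        rw [hm, hA]
        -- B side: zip (0 :: f 0 :: T) (f 0 :: T)
        rw [List.range_succ_eq_map, List.map_cons, List.map_map]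
        simp only [Nat.cast_zero, mul_zero, add_zero, List.singleton_append,
          List.drop_succ_cons, List.drop_zero, List.zip_cons_cons]
        congr 1
        have := zipShift (fun k : Nat => leftover + rf * (k : Int)) m
        rw [List.range_succ_eq_map, List.map_cons, List.map_map] at this
        simp only [Nat.cast_zero, mul_zero, add_zero, List.drop_succ_cons, List.drop_zero] at this
        rw [this]
        apply List.map_congr_left
        intro k hk
        simp only [Function.comp, Prod.mk.injEq]
        try constructor
        all_goals (push_cast; try ring)
      · have hz : leftover = 0 := by omega
        have hA0 := hA []
        simp only [if_neg hpos, List.nil_append]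
        rw [hm]
        simp only [hz, zero_add] at hA0 ⊢
        rw [hA0, zipShift]
        simp only [List.nil_append]
        apply List.map_congr_left
        intro k hk
        simp only [Prod.mk.injEq]
        try constructor
        all_goals (push_cast; try ring)
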